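-- pv_equiv track=rewrite | github.com/JLsla/Python | Exercicios/8 - Questões Avulsas/Quest2.py | classifica_numeros
-- ===== SOURCE A (Python) =====
-- def classifica_numeros(numero):
--     par = 0
--     impar = 0
--     retorno = ()
--     soma = 0
--     for i in numero:
--         if i % 2 == 0:
--             par += 1
--         else:
--             impar += 1
--         soma += i
--     retorno += (par, )
--     retorno += (impar, )
--     retorno += (soma, )
--     return retorno
-- ===== SOURCE B (Python) =====
-- def classifica_numeros(numero):
--     nums = list(numero)
--     par = sum(1 for i in nums if i % 2 == 0)
--     return (par, len(nums) - par, sum(nums))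
-- ===== Notes on version B (the rewrite author's own statement) =====
-- stated objective: idiomatic
-- what changed: Replaces the fused branching loop with separate built-in aggregate passes: even count via a filtered sum, odd count derived as len - par, and sum() for the total.
import Mathlib
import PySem

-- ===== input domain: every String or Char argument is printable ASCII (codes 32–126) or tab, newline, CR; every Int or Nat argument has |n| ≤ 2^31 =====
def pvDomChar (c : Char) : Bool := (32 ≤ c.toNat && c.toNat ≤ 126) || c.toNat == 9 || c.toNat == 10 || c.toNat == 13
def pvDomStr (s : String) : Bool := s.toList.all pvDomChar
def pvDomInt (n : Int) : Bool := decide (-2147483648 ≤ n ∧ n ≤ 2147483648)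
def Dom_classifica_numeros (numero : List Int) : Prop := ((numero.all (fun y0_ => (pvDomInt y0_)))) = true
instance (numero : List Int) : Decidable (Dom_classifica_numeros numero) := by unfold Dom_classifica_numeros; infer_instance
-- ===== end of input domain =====

-- B replaces A's single fused branching loop with separate aggregate passes (even count, odd = len - even, sum), for idiomatic clarity; same cost.

-- ===== PORT A =====
-- literal transliteration of A's fused loop: one fold carrying (par, impar, soma)
def classifica_numeros (numero : List Int) : Int × Int × Int :=
  let st := numero.foldl (fun (acc : Int × Int × Int) i =>
    let (par, impar, soma) := acc
    if PySem.Int.mod i 2 = 0 then (par + 1, impar, soma + i)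
    else (par, impar + 1, soma + i)) (0, 0, 0)
  (st.1, st.2.1, st.2.2)

-- ===== PORT B =====
-- B: separate aggregate passes; odd count derived by subtraction
def classifica_numeros_alt (numero : List Int) : Int × Int × Int :=
  let par : Int := ((numero.filter (fun i => PySem.Int.mod i 2 = 0)).map (fun _ => (1 : Int))).sum
  (par, (numero.length : Int) - par, numero.sum)

-- ===== PRECONDITION & SPEC =====
def Spec_classifica_numeros (numero : List Int) (out : Int × Int × Int) : Prop := out = classifica_numeros_alt numero
instance (numero : List Int) (out : Int × Int × Int) : Decidable (Spec_classifica_numeros numero out) := by unfold Spec_classifica_numeros; infer_instance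

-- ===== CLAIM (what is proved, stated in full; the proofs are below) =====
def Claim_equal_classifica_numeros : Prop := ∀ (numero : List Int), Dom_classifica_numeros numero → Spec_classifica_numeros numero (classifica_numeros numero)

-- ===== LEMMAS AND PROOFS =====

lemma map_one_sum (l : List Int) : (l.map (fun _ => (1 : Int))).sum = (l.length : Int) := by
  induction l with
  | nil => simp
  | cons a t ih => simp [ih]; ring

lemma cn_fold (numero : List Int) (p q s : Int) :
    numero.foldl (fun (acc : Int × Int × Int) i =>
      let (par, impar, soma) := acc
      if PySem.Int.mod i 2 = 0 then (par + 1, impar, soma + i)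
      else (par, impar + 1, soma + i)) (p, q, s)
    = (p + ((numero.filter (fun i => PySem.Int.mod i 2 = 0)).length : Int),
       q + ((numero.length : Int) - ((numero.filter (fun i => PySem.Int.mod i 2 = 0)).length : Int)),
       s + numero.sum) := by
  induction numero generalizing p q s with
  | nil => simp
  | cons a t ih =>
      simp only [List.foldl_cons, List.filter_cons, List.length_cons, List.sum_cons]
      by_cases h : PySem.Int.mod a 2 = 0 <;>
        simp only [h, if_pos, if_neg, ite_true, ite_false, decide_true, decide_false,
          List.length_cons, ih, decide_eq_true_eq] <;>
        refine Prod.ext ?_ (Prod.ext ?_ ?_) <;> simp <;> push_cast <;> ring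

-- ===== VERDICT (by name: the statement is the Claim_ definition above) =====
theorem classifica_numeros_spec : Claim_equal_classifica_numeros := by
  intro numero _
  unfold Spec_classifica_numeros classifica_numeros classifica_numeros_alt
  simp only [map_one_sum, cn_fold]
  simp
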